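-- pv_equiv track=rewrite | github.com/KraKlore/Ordlig | findWord.py | _not_letters
-- ===== SOURCE A (Python) =====
-- from typing import List
--
-- def _not_letters(words:[str], letters:[str]) -> List[str]:
--     """Find words that does not contain the letters given and return any that does not contain these.
--
--     Args:
--         words (str]): list of words to check
--         letters (str]): list of letters to check
--
--     Returns:
--         [str]: A list of words that does not contain the letters given.
--     """
--     if len(letters) == 0:
--         return words
--     result = []
--     letters = set(letters)
--     for word in words:
--         for letter in letters:
--             if letter in word:
--                 break
--         else:
--             result.append(word)
--     return result
-- ===== SOURCE B (Python) =====
-- def _not_letters(words, letters):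
--     """Filter out words containing any of the given letters (substring check).
--
--     Different traversal: instead of scanning every letter per word, we fold
--     over the letters, narrowing the surviving word list one letter at a time.
--     """
--     result = list(words)
--     for letter in letters:
--         result = [w for w in result if letter not in w]
--     return result
-- ===== Notes on version B (the rewrite author's own statement) =====
-- stated objective: alternative
-- what changed: B inverts the traversal: instead of an inner loop over the letter set for each word (with for/else break), it folds over the letters, filtering the surviving word list once per letter; no set is built and no per-word inner loop remains.
import Mathlib
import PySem

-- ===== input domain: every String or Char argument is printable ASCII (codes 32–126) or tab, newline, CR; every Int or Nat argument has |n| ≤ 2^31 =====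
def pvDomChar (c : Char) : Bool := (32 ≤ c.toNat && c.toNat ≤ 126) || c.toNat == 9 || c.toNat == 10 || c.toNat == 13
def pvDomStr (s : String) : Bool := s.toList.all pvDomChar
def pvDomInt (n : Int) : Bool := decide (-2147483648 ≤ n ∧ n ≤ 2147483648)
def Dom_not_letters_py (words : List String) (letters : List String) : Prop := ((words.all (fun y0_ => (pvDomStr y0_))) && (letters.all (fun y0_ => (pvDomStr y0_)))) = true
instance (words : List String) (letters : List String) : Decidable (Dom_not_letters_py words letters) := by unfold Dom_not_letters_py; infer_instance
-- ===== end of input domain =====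

-- B changes the traversal (fold over letters filtering the word list, instead of a per-word
-- inner loop over a letter set); objective: alternative structure, same result.

-- ===== PORT A =====
-- inner 'for letter in lset: if letter in word: break / else: append' — appends iff no letter hits;
-- short-circuit scan over the set is List.any (result is independent of set iteration order)
def not_letters_py (words : List String) (letters : List String) : List String :=
  if letters.length == 0 then words
  else
    let lset : PySem.Set String := PySem.Set.ofList letters
    words.foldl
      (fun result word =>
        if lset.any (fun letter => PySem.Str.isIn letter word) then result
        else result ++ [word]) []

-- ===== PORT B =====
def not_letters_py_alt (words : List String) (letters : List String) : List String :=
  letters.foldl (fun result letter => result.filter (fun w => !(PySem.Str.isIn letter w))) words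

-- ===== PRECONDITION & SPEC =====
def Spec_not_letters_py (words : List String) (letters : List String) (out : List String) : Prop := out = not_letters_py_alt words letters
instance (words : List String) (letters : List String) (out : List String) : Decidable (Spec_not_letters_py words letters out) := by unfold Spec_not_letters_py; infer_instance

-- ===== CLAIM (what is proved, stated in full; the proofs are below) =====
def Claim_equal_not_letters_py : Prop := ∀ (words : List String) (letters : List String), Dom_not_letters_py words letters → Spec_not_letters_py words letters (not_letters_py words letters)

-- ===== LEMMAS AND PROOFS =====

-- A's append-if fold is a filter
theorem foldl_append_ite_filter (p : String → Bool) (words acc : List String) :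
    words.foldl (fun result word => if p word then result else result ++ [word]) acc
      = acc ++ words.filter (fun w => !(p w)) := by
  induction words generalizing acc with
  | nil => simp
  | cons w ws ih =>
    simp only [List.foldl_cons, List.filter_cons]
    by_cases h : p w = true
    · simp [h, ih]
    · rw [Bool.not_eq_true] at h
      simp [h, ih]

-- any over set(letters) = any over letters (same membership)
theorem any_ofList (letters : List String) (p : String → Bool) :
    (PySem.Set.ofList letters).any p = letters.any p := by
  by_cases h : letters.any p = true
  · rw [h]
    rw [List.any_eq_true] at h ⊢
    obtain ⟨x, hx, hp⟩ := h
    exact ⟨x, (PySem.Set.mem_ofList letters x).mpr hx, hp⟩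
  · rw [Bool.eq_false_iff.mpr h]
    rw [Bool.eq_false_iff]
    intro hc
    apply h
    rw [List.any_eq_true] at hc ⊢
    obtain ⟨x, hx, hp⟩ := hc
    exact ⟨x, (PySem.Set.mem_ofList letters x).mp hx, hp⟩

-- B's fold of filters is one filter with the conjunction of the tests
theorem foldl_filter_all (letters words : List String) :
    letters.foldl (fun result letter => result.filter (fun w => !(PySem.Str.isIn letter w))) words
      = words.filter (fun w => letters.all (fun l => !(PySem.Str.isIn l w))) := by
  induction letters generalizing words with
  | nil => simp
  | cons l ls ih =>
    simp only [List.foldl_cons, ih, List.filter_filter, List.all_cons]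
    apply List.filter_congr
    intro w _
    cases PySem.Str.isIn l w <;> simp

-- ===== VERDICT (by name: the statement is the Claim_ definition above) =====
theorem not_letters_py_spec : Claim_equal_not_letters_py := by
  intro words letters _
  show not_letters_py words letters = not_letters_py_alt words letters
  unfold not_letters_py not_letters_py_alt
  rw [foldl_filter_all]
  by_cases h : letters = []
  · subst h; simp
  · have hlen : (letters.length == 0) = false := by
      simp [List.length_eq_zero_iff, h]
    rw [hlen]
    simp only [Bool.false_eq_true, if_false]
    rw [foldl_append_ite_filter]
    simp only [List.nil_append]
    apply List.filter_congr
    intro w _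
    rw [any_ofList]
    cases hA : letters.any (fun letter => PySem.Str.isIn letter w)
    · simp only [Bool.not_false]
      rw [eq_comm]
      rw [List.any_eq_false] at hA
      rw [List.all_eq_true]
      intro l hl
      simpa using Bool.eq_false_iff.mpr (hA l hl)
    · simp only [Bool.not_true]
      rw [List.any_eq_true] at hA
      obtain ⟨x, hx, hp⟩ := hA
      rw [eq_comm, Bool.eq_false_iff]
      intro hall
      rw [List.all_eq_true] at hall
      have h2 := hall x hx
      rw [hp] at h2
      simp at h2
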